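-- pv_equiv track=rewrite | github.com/Haataja/AOC_python | y2024/d10/solution.py | parse
-- ===== SOURCE A (Python) =====
-- def parse(data):
--     parsed_data = []
--     starting_points = []
--     data = data.split("\n")
--     for row_index in range(len(data)):
--         row = []
--         for col_index in range(len(data[row_index])):
--             number = int(data[row_index][col_index])
--             row.append(number)
--             if number == 0:
--                 starting_points.append((row_index, col_index))
--         parsed_data.append(row)
--
--     return parsed_data, starting_points
-- ===== SOURCE B (Python) =====
-- def parse(data):
--     # Single streaming scan of the raw string: no split, no indexing;
--     # a state machine over characters with explicit (row, col) counters.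
--     rows = []
--     cur = []
--     zeros = []
--     r = 0
--     c = 0
--     for ch in data:
--         if ch == "\n":
--             rows.append(cur)
--             cur = []
--             r += 1
--             c = 0
--         else:
--             v = int(ch)
--             cur.append(v)
--             if v == 0:
--                 zeros.append((r, c))
--             c += 1
--     rows.append(cur)
--     return rows, zeros
-- ===== Notes on version B (the rewrite author's own statement) =====
-- stated objective: alternative
-- what changed: A splits the text into lines and runs a nested index loop over each line; B never splits: it is a single streaming state machine over the raw characters that handles newlines itself, maintaining explicit (row, col) counters and the current row as accumulator state.
import Mathlib
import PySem

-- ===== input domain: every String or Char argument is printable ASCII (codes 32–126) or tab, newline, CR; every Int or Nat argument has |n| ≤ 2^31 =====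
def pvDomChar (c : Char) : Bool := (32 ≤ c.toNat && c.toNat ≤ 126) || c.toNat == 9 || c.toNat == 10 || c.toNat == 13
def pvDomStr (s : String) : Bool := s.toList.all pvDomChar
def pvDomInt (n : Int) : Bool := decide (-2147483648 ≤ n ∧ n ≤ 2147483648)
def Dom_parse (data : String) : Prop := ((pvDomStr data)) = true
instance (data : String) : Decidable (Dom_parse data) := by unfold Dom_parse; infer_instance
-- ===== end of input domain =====

-- B replaces A's split-into-lines + nested index loops by a single streaming state machine over the raw characters (no split); objective: alternative decomposition, same cost.


-- int(c) for a single character c (Python raises ValueError on non-digits; Pre_ excludes those)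
def pyIntChar (c : Char) : Int := (PySem.Int.ofChars? [c]).getD 0

-- ===== PORT A =====
-- A: split into lines, then a fused nested index loop; per cell appends to the row and, on 0, to starting_points.
def parse (data : String) : List (List Int) × (List (Int × Int)) :=
  let lines := (PySem.Str.split? data "\n").getD []
  (PySem.List.enumerate lines 0).foldl
    (init := (([] : List (List Int)), ([] : List (Int × Int))))
    (fun acc p =>
      let inner := (PySem.List.enumerate p.2.toList 0).foldl
        (init := (([] : List Int), acc.2))
        (fun acc2 q =>
          let number := pyIntChar q.2
          (acc2.1 ++ [number],
           if number == 0 then acc2.2 ++ [(p.1, q.1)] else acc2.2))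
      (acc.1 ++ [inner.1], inner.2))

-- ===== PORT B =====
-- B: one streaming pass over the raw characters; state (finished rows, current row, zeros, row counter, col counter); a final append of the current row.
def parse_alt (data : String) : List (List Int) × (List (Int × Int)) :=
  let st := data.toList.foldl
    (init := (([] : List (List Int)), ([] : List Int), ([] : List (Int × Int)), (0 : Int), (0 : Int)))
    (fun st ch =>
      if ch == '\n' then
        (st.1 ++ [st.2.1], [], st.2.2.1, st.2.2.2.1 + 1, 0)
      else
        (st.1, st.2.1 ++ [pyIntChar ch], (if pyIntChar ch == 0 then st.2.2.1 ++ [(st.2.2.2.1, st.2.2.2.2)] else st.2.2.1), st.2.2.2.1, st.2.2.2.2 + 1))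
  (st.1 ++ [st.2.1], st.2.2.1)

-- ===== PRECONDITION & SPEC =====
-- Pre_ excludes inputs where Python's int(c) raises ValueError: every character must be a decimal digit or a line separator.
def Pre_parse (data : String) : Prop := data.toList.all (fun c => c.isDigit || c == '\n') = true
instance (data : String) : Decidable (Pre_parse data) := by unfold Pre_parse; infer_instance
def pvWitness_parse : String := "10\n02"

def Spec_parse (data : String) (out : List (List Int) × (List (Int × Int))) : Prop := out = parse_alt data
instance (data : String) (out : List (List Int) × (List (Int × Int))) : Decidable (Spec_parse data out) := by unfold Spec_parse; infer_instance

-- ===== CLAIM (what is proved, stated in full; the proofs are below) =====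
def Claim_equal_parse : Prop := ∀ (data : String), Dom_parse data → Pre_parse data → Spec_parse data (parse data)

-- ===== LEMMAS AND PROOFS =====

-- split on '\n' as a plain structural recursion (cur = current piece, reversed)
def mySplit (l : List Char) (cur : List Char) : List (List Char) :=
  match l with
  | [] => [cur.reverse]
  | x :: xs => if x = '\n' then cur.reverse :: mySplit xs [] else mySplit xs (x :: cur)

theorem go_char (fuel : Nat) (l cur : List Char) (acc : List (List Char))
    (h : l.length ≤ fuel) :
    PySem.Chars.splitOn.go ['\n'] fuel l cur acc = acc.reverse ++ mySplit l cur := by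
  induction fuel generalizing l cur acc with
  | zero =>
      have : l = [] := List.eq_nil_of_length_eq_zero (Nat.le_zero.mp h)
      subst this
      simp [PySem.Chars.splitOn.go, mySplit]
  | succ n ih =>
      cases l with
      | nil => simp [PySem.Chars.splitOn.go, mySplit]
      | cons x xs =>
          simp only [PySem.Chars.splitOn.go, mySplit]
          by_cases hx : x = '\n'
          · subst hx
            rw [if_pos (by simp [List.isPrefixOf])]
            simp only [List.length_cons, List.drop_succ_cons, List.length_nil, List.drop_zero]
            rw [ih xs [] (cur.reverse :: acc) (by simpa using Nat.le_of_succ_le_succ h)]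
            simp
          · rw [if_neg (by simp [List.isPrefixOf]; exact fun hh => hx hh.symm), if_neg hx]
            exact ih xs (x :: cur) acc (by simpa using Nat.le_of_succ_le_succ h)

theorem split_char (s : List Char) :
    PySem.Chars.splitOn s ['\n'] = mySplit s [] := by
  rw [PySem.Chars.splitOn, go_char _ _ _ _ (Nat.le_succ _)]
  simp

-- the grid B produces from the remaining characters, current row cur
def gridOf (l : List Char) (cur : List Int) : List (List Int) :=
  match l with
  | [] => [cur]
  | ch :: cs => if ch = '\n' then cur :: gridOf cs [] else gridOf cs (cur ++ [pyIntChar ch])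

-- the zero positions B produces from the remaining characters at counters (r, c)
def zerosOf (l : List Char) (r c : Int) : List (Int × Int) :=
  match l with
  | [] => []
  | ch :: cs =>
      if ch = '\n' then zerosOf cs (r + 1) 0
      else (if pyIntChar ch = 0 then [(r, c)] else []) ++ zerosOf cs r (c + 1)

-- zeros of one row (A's inner filterMap view)
def zerosRow (r : Int) (cs : List Int) (s : Int) : List (Int × Int) :=
  (PySem.List.enumerate cs s).filterMap (fun q => if q.2 == 0 then some (r, q.1) else none)

theorem zerosRow_cons (r v : Int) (cs : List Int) (s : Int) :
    zerosRow r (v :: cs) s =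
      (if v == 0 then [(r, s)] else []) ++ zerosRow r cs (s + 1) := by
  simp only [zerosRow, PySem.List.enumerate_cons, List.filterMap_cons]
  split <;> simp_all

theorem zerosRow_append_one (r v : Int) (cs : List Int) (s : Int) :
    zerosRow r (cs ++ [v]) s =
      zerosRow r cs s ++ (if v == 0 then [(r, s + cs.length)] else []) := by
  induction cs generalizing s with
  | nil =>
      simp only [List.nil_append]
      rw [zerosRow_cons]
      simp [zerosRow, PySem.List.enumerate]
  | cons x xs ih =>
      simp only [List.cons_append, zerosRow_cons, ih, List.append_assoc, List.length_cons]
      have h : s + 1 + (xs.length : Int) = s + ((xs.length + 1 : Nat) : Int) := by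
        push_cast
        ring
      rw [h]

-- inner loop of A, characterised
theorem inner_eq (r : Int) (cs : List Char) (s : Int)
    (row : List Int) (sp : List (Int × Int)) :
    (PySem.List.enumerate cs s).foldl
      (init := (row, sp))
      (fun acc2 q =>
        let number := pyIntChar q.2
        (acc2.1 ++ [number],
         if number == 0 then acc2.2 ++ [(r, q.1)] else acc2.2))
      = (row ++ cs.map pyIntChar, sp ++ zerosRow r (cs.map pyIntChar) s) := by
  induction cs generalizing s row sp with
  | nil => simp [zerosRow]
  | cons c cs ih =>
      simp only [PySem.List.enumerate_cons, List.foldl_cons, List.map_cons, zerosRow_cons]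
      rw [ih]
      split <;> simp

-- A's zero list over a whole grid
def zerosA (g : List (List Int)) (s : Int) : List (Int × Int) :=
  (PySem.List.enumerate g s).flatMap (fun p => zerosRow p.1 p.2 0)

-- outer loop of A, characterised
theorem outer_eq (lines : List String) (s : Int)
    (pd : List (List Int)) (sp : List (Int × Int)) :
    (PySem.List.enumerate lines s).foldl
      (init := (pd, sp))
      (fun acc p =>
        let inner := (PySem.List.enumerate p.2.toList 0).foldl
          (init := (([] : List Int), acc.2))
          (fun acc2 q =>
            let number := pyIntChar q.2
            (acc2.1 ++ [number],
             if number == 0 then acc2.2 ++ [(p.1, q.1)] else acc2.2))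
        (acc.1 ++ [inner.1], inner.2))
      = (pd ++ lines.map (fun row => row.toList.map pyIntChar),
         sp ++ zerosA (lines.map (fun row => row.toList.map pyIntChar)) s) := by
  induction lines generalizing s pd sp with
  | nil => simp [zerosA, PySem.List.enumerate_nil]
  | cons l ls ih =>
      simp only [PySem.List.enumerate_cons, List.foldl_cons, List.map_cons]
      rw [inner_eq, ih]
      simp [zerosA, PySem.List.enumerate_cons]

-- the split lines, mapped to int rows, are B's grid
theorem mySplit_map (cs : List Char) (cur : List Char) :
    (mySplit cs cur).map (List.map pyIntChar) = gridOf cs (cur.reverse.map pyIntChar) := by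
  induction cs generalizing cur with
  | nil => simp [mySplit, gridOf]
  | cons x xs ih =>
      simp only [mySplit, gridOf]
      by_cases hx : x = '\n'
      · simp [hx, ih]
      · rw [if_neg hx, if_neg hx, ih]
        simp

-- A's zeros over B's grid are B's zeros
theorem zerosA_gridOf (cs : List Char) (cur : List Int) (r : Int) :
    zerosA (gridOf cs cur) r = zerosRow r cur 0 ++ zerosOf cs r cur.length := by
  induction cs generalizing cur r with
  | nil => simp [gridOf, zerosOf, zerosA, PySem.List.enumerate_cons]
  | cons ch chs ih =>
      simp only [gridOf, zerosOf]
      by_cases hch : ch = '\n'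
      · simp only [if_pos hch]
        simp only [zerosA, PySem.List.enumerate_cons, List.flatMap_cons]
        have := ih [] (r + 1)
        simp only [zerosA] at this
        rw [this]
        simp [zerosRow, PySem.List.enumerate]
      · simp only [if_neg hch]
        rw [ih]
        rw [zerosRow_append_one]
        simp only [List.length_append, List.length_cons, List.length_nil]
        push_cast
        simp [List.append_assoc]

-- B's fold, characterised: running state = (grid so far minus current row, current row, zeros, row idx, col idx)
theorem foldB_char (l : List Char) (rows : List (List Int)) (cur : List Int)
    (zeros : List (Int × Int)) (r : Int) :
    (l.foldl
      (init := (rows, cur, zeros, r, (cur.length : Int)))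
      (fun st ch =>
        if ch == '\n' then
          (st.1 ++ [st.2.1], [], st.2.2.1, st.2.2.2.1 + 1, 0)
        else
          (st.1, st.2.1 ++ [pyIntChar ch], (if pyIntChar ch == 0 then st.2.2.1 ++ [(st.2.2.2.1, st.2.2.2.2)] else st.2.2.1), st.2.2.2.1, st.2.2.2.2 + 1))).1
      ++ [(l.foldl
      (init := (rows, cur, zeros, r, (cur.length : Int)))
      (fun st ch =>
        if ch == '\n' then
          (st.1 ++ [st.2.1], [], st.2.2.1, st.2.2.2.1 + 1, 0)
        else
          (st.1, st.2.1 ++ [pyIntChar ch], (if pyIntChar ch == 0 then st.2.2.1 ++ [(st.2.2.2.1, st.2.2.2.2)] else st.2.2.1), st.2.2.2.1, st.2.2.2.2 + 1))).2.1]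
      = rows ++ gridOf l cur
    ∧ (l.foldl
      (init := (rows, cur, zeros, r, (cur.length : Int)))
      (fun st ch =>
        if ch == '\n' then
          (st.1 ++ [st.2.1], [], st.2.2.1, st.2.2.2.1 + 1, 0)
        else
          (st.1, st.2.1 ++ [pyIntChar ch], (if pyIntChar ch == 0 then st.2.2.1 ++ [(st.2.2.2.1, st.2.2.2.2)] else st.2.2.1), st.2.2.2.1, st.2.2.2.2 + 1))).2.2.1
      = zeros ++ zerosOf l r cur.length := by
  induction l generalizing rows cur zeros r with
  | nil => simp [gridOf, zerosOf]
  | cons ch chs ih =>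
      simp only [List.foldl_cons, gridOf, zerosOf]
      by_cases hch : ch = '\n'
      · simp only [hch, beq_self_eq_true, if_pos]
        have := ih (rows ++ [cur]) [] zeros (r + 1)
        simp only [List.length_nil, Nat.cast_zero] at this
        refine ⟨?_, ?_⟩
        · rw [this.1]; simp
        · rw [this.2]
      · have hb : (ch == '\n') = false := by simp [hch]
        simp only [hb, Bool.false_eq_true, if_false, if_neg hch]
        have := ih rows (cur ++ [pyIntChar ch])
          (if pyIntChar ch == 0 then zeros ++ [(r, (cur.length : Int))] else zeros) r
        simp only [List.length_append, List.length_cons, List.length_nil] at this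
        have hc : ((cur.length + (0 + 1) : Nat) : Int) = (cur.length : Int) + 1 := by push_cast; ring
        rw [hc] at this
        refine ⟨this.1, ?_⟩
        rw [this.2]
        by_cases h0 : pyIntChar ch = 0 <;> simp [h0, List.append_assoc]

-- ===== VERDICT (by name: the statement is the Claim_ definition above) =====
theorem parse_spec : Claim_equal_parse := by
  intro data _ _
  show parse data = parse_alt data
  have hsplit : (PySem.Str.split? data "\n").getD [] =
      (mySplit data.toList []).map String.ofList := by
    simp [PySem.Str.split?, PySem.Chars.split?, split_char]
  simp only [parse, parse_alt]
  rw [hsplit, outer_eq]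
  have hmap : ((mySplit data.toList []).map String.ofList).map
      (fun row => row.toList.map pyIntChar) = gridOf data.toList [] := by
    rw [List.map_map]
    have h2 : ((fun (row : String) => row.toList.map pyIntChar) ∘ String.ofList)
        = List.map pyIntChar := by
      funext l
      simp
    rw [h2]
    simpa using mySplit_map data.toList []
  rw [hmap, zerosA_gridOf]
  have hfold := foldB_char data.toList [] [] [] 0
  simp only [List.length_nil, Nat.cast_zero, List.nil_append] at hfold
  rw [← hfold.1, hfold.2]
  simp [zerosRow, PySem.List.enumerate]
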